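-- pv_equiv track=rewrite | github.com/aertsimon90/ElongatorLib | __init__.py | left_compaction
-- ===== SOURCE A (Python) =====
-- def left_compaction(i, length):
-- 	li = len(i)
-- 	while li > length:
-- 		diff = li-length
-- 		new = []
-- 		for ii, h in enumerate(i):
-- 			if diff and (ii-1)%2 == 0:
-- 				diff -= 1
-- 			else:
-- 				new.append(h)
-- 		i = new
-- 		li = len(i)
-- 	return i
-- ===== SOURCE B (Python) =====
-- def left_compaction(i, length):
-- 	while len(i) > length:
-- 		d = len(i) - length
-- 		i = i[0:2*d:2] + i[2*d:]
-- 	return i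
-- ===== Notes on version B (the rewrite author's own statement) =====
-- stated objective: simpler
-- what changed: Each compaction pass drops the first diff odd-indexed elements by slice arithmetic (i[0:2*diff:2] + i[2*diff:]) instead of an enumerate loop with a mutable diff counter and per-element branching.
import Mathlib
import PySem

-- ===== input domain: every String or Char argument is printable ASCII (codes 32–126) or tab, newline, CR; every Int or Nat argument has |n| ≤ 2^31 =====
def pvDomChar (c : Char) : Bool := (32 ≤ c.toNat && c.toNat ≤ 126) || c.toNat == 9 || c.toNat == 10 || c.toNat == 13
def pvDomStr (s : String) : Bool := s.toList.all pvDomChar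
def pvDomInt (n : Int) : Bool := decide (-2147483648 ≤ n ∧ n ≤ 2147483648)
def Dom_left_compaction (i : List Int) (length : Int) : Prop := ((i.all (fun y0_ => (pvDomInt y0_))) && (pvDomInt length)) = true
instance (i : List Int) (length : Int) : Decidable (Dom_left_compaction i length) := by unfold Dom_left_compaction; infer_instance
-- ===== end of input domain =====

-- B replaces A's per-element enumerate/counter filtering pass by slice arithmetic (simpler); return value only, no argument is mutated.

-- ===== PORT A =====
-- the body of A's inner `for ii, h in enumerate(i)` loop; state = (diff, new)
def lcStepA (st : Int × List Int) (p : Int × Int) : Int × List Int :=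
  if st.1 ≠ 0 ∧ PySem.Int.mod (p.1 - 1) 2 = 0 then (st.1 - 1, st.2) else (st.1, st.2 ++ [p.2])

-- A's `while li > length` loop as recursion; the `hlt` guard only makes the recursion
-- total: on inputs where a pass removes nothing Python loops forever (excluded by Pre_).
def left_compaction (i : List Int) (length : Int) : List Int :=
  if _h : PySem.List.len i > length then
    let diff := PySem.List.len i - length
    let new := ((PySem.List.enumerate i 0).foldl lcStepA (diff, [])).2
    if hlt : new.length < i.length then left_compaction new length else new
  else i
termination_by i.length
decreasing_by exact hlt

-- ===== PORT B =====
-- B's `while len(i) > length` loop; per pass i = i[0:2*d:2] + i[2*d:] (slice? with step 2 is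
-- always `some`, the step being 2 ≠ 0); the `hlt` guard only makes the recursion total.
def left_compaction_alt (i : List Int) (length : Int) : List Int :=
  if _h : PySem.List.len i > length then
    let d := PySem.List.len i - length
    let j := ((PySem.List.slice? i (some 0) (some (2*d)) 2).getD []) ++ PySem.List.slice i (some (2*d)) none
    if hlt : j.length < i.length then left_compaction_alt j length else j
  else i
termination_by i.length
decreasing_by exact hlt

-- ===== PRECONDITION & SPEC =====
-- Pre_ excludes exactly the inputs where A never returns: if len(i) > length and length < 1,
-- a pass over a list of length ≤ 1 removes nothing and the while loop runs forever.
def Pre_left_compaction (i : List Int) (length : Int) : Prop :=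
  PySem.List.len i ≤ length ∨ 1 ≤ length
instance (i : List Int) (length : Int) : Decidable (Pre_left_compaction i length) := by
  unfold Pre_left_compaction; infer_instance

def pvWitness_left_compaction : List Int × Int := ([1, 2, 3, 4, 5], 2)

def Spec_left_compaction (i : List Int) (length : Int) (out : List Int) : Prop := out = left_compaction_alt i length
instance (i : List Int) (length : Int) (out : List Int) : Decidable (Spec_left_compaction i length out) := by unfold Spec_left_compaction; infer_instance

-- ===== CLAIM (what is proved, stated in full; the proofs are below) =====
def Claim_equal_left_compaction : Prop := ∀ (i : List Int) (length : Int), Dom_left_compaction i length → Pre_left_compaction i length → Spec_left_compaction i length (left_compaction i length)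

-- ===== LEMMAS AND PROOFS =====

-- the result of one pass: even positions among the first 2*d slots, then the untouched tail
def lcEvens : List Int → List Int
  | [] => []
  | [a] => [a]
  | a :: _ :: r => a :: lcEvens r

def lcPass (xs : List Int) (dn : Nat) : List Int :=
  lcEvens (xs.take (2*dn)) ++ xs.drop (2*dn)

theorem lcEvens_length : ∀ l : List Int, (lcEvens l).length = (l.length + 1) / 2
  | [] => rfl
  | [_] => by simp [lcEvens]
  | _ :: _ :: r => by simp [lcEvens, lcEvens_length r]; omega

theorem lcPass_length (xs : List Int) (dn : Nat) :
    (lcPass xs dn).length = (min (2*dn) xs.length + 1) / 2 + (xs.length - 2*dn) := by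
  simp [lcPass, lcEvens_length]

-- the A-side fold: the accumulator splits off
theorem foldA_acc (l : List (Int × Int)) (d : Int) (acc : List Int) :
    l.foldl lcStepA (d, acc) = ((l.foldl lcStepA (d, [])).1, acc ++ (l.foldl lcStepA (d, [])).2) := by
  induction l generalizing d acc with
  | nil => simp
  | cons p l ih =>
    simp only [List.foldl_cons]
    by_cases h : d ≠ 0 ∧ PySem.Int.mod (p.1 - 1) 2 = 0
    · rw [show lcStepA (d, acc) p = (d - 1, acc) from by rw [lcStepA, if_pos h],
          show lcStepA (d, []) p = (d - 1, []) from by rw [lcStepA, if_pos h],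
          ih (d-1) acc]
    · rw [show lcStepA (d, acc) p = (d, acc ++ [p.2]) from by rw [lcStepA, if_neg h],
          show lcStepA (d, []) p = (d, [] ++ [p.2]) from by rw [lcStepA, if_neg h],
          ih d (acc ++ [p.2]), ih d ([] ++ [p.2])]
      simp
-- the condition in lcStepA only sees the index's parity, so shifting enumerate's start by 2 is invisible
theorem foldA_shift2 (xs : List Int) (s : Int) (st : Int × List Int) :
    (PySem.List.enumerate xs (s+2)).foldl lcStepA st = (PySem.List.enumerate xs s).foldl lcStepA st := by
  induction xs generalizing s st with
  | nil => simp [PySem.List.enumerate_nil]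
  | cons x xs ih =>
    rw [PySem.List.enumerate_cons, PySem.List.enumerate_cons, List.foldl_cons, List.foldl_cons]
    have hmod : PySem.Int.mod (s + 2 - 1) 2 = PySem.Int.mod (s - 1) 2 := by
      simp only [PySem.Int.mod_eq_emod_of_pos (show (0:Int) < 2 by norm_num)]
      omega
    have hstep : lcStepA st (s + 2, x) = lcStepA st (s, x) := by simp only [lcStepA, hmod]
    rw [hstep, show s + 2 + 1 = (s + 1) + 2 from by ring, ih (s+1)]

-- with diff = 0 the pass keeps everything
theorem foldA_zero (xs : List Int) (s : Int) (acc : List Int) :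
    (PySem.List.enumerate xs s).foldl lcStepA (0, acc) = (0, acc ++ xs) := by
  induction xs generalizing s acc with
  | nil => simp [PySem.List.enumerate_nil]
  | cons x xs ih =>
    rw [PySem.List.enumerate_cons, List.foldl_cons,
        show lcStepA (0, acc) (s, x) = (0, acc ++ [x]) from by simp [lcStepA], ih]
    simp

-- A's pass equals lcPass
theorem foldA_eq_lcPass : ∀ (xs : List Int) (d : Int), 0 ≤ d →
    ((PySem.List.enumerate xs 0).foldl lcStepA (d, [])).2 = lcPass xs d.toNat
  | xs, d, hd => by
    by_cases h0 : d = 0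
    · subst h0; rw [foldA_zero]; simp [lcPass, lcEvens]
    · match xs with
      | [] => simp [PySem.List.enumerate_nil, lcPass, lcEvens]
      | [a] =>
        rw [PySem.List.enumerate_cons, PySem.List.enumerate_nil]
        have h1 : 1 ≤ d.toNat := by omega
        rw [List.foldl_cons, show lcStepA (d, []) (0, a) = (d, [a]) from by simp [lcStepA]]
        simp [lcPass, List.take_of_length_le (by simp; omega : ([a] : List Int).length ≤ 2*d.toNat),
              List.drop_of_length_le (by simp; omega : ([a] : List Int).length ≤ 2*d.toNat), lcEvens]
      | a :: b :: r =>
        rw [PySem.List.enumerate_cons, PySem.List.enumerate_cons, List.foldl_cons, List.foldl_cons]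
        rw [show lcStepA (d, []) (0, a) = (d, [a]) from by simp [lcStepA],
            show lcStepA (d, [a]) (0 + 1, b) = (d - 1, [a]) from by simp [lcStepA, h0],
            show (0 : Int) + 1 + 1 = 0 + 2 from by ring, foldA_shift2, foldA_acc]
        have ih := foldA_eq_lcPass r (d - 1) (by omega)
        simp only [ih]
        have hdn : d.toNat = (d-1).toNat + 1 := by omega
        rw [lcPass, lcPass, hdn, show 2 * ((d-1).toNat + 1) = 2*(d-1).toNat + 1 + 1 from by ring,
            List.take_succ_cons, List.take_succ_cons, List.drop_succ_cons, List.drop_succ_cons]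
        simp [lcEvens]
termination_by xs _ _ => xs.length

-- B's head slice: the filterMap core of slice? with step 2 picks the even positions
theorem filterMap_evens : ∀ (xs : List Int) (c : Nat), c ≤ (xs.length + 1) / 2 →
    List.filterMap (fun k : Nat => xs[2*k]?) (List.range c) = lcEvens (xs.take (2*c))
  | xs, 0, _ => by simp [lcEvens]
  | [], c, h => by simp [lcEvens]
  | [a], c+1, h => by
    have hc : c = 0 := by simp at h; omega
    subst hc; simp [lcEvens]
  | a :: b :: r, c+1, h => by
    rw [List.range_succ_eq_map, List.filterMap_cons, List.filterMap_map]
    have hf : ((fun k : Nat => (a :: b :: r)[2*k]?) ∘ Nat.succ) = (fun k : Nat => r[2*k]?) := by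
      funext k
      simp only [Function.comp]
      rw [show 2 * Nat.succ k = 2*k + 1 + 1 from by omega]
      simp
    rw [hf, filterMap_evens r c (by simp at h ⊢; omega)]
    rw [show 2*(c+1) = 2*c + 1 + 1 from by omega]
    simp [lcEvens]
termination_by xs _ _ => xs.length

theorem sliceIdx (n : Nat) (dn : Nat) :
    PySem.List.sliceIndices n (some 0) (some ((2*dn : Nat) : Int)) 2 = (0, min ((2*dn : Nat) : Int) n, 2) := by
  simp [PySem.List.sliceIndices]

theorem slice?_step2 (xs : List Int) (dn : Nat) :
    PySem.List.slice? xs (some 0) (some ((2*dn : Nat) : Int)) 2 = some (lcEvens (xs.take (2*dn))) := by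
  rw [PySem.List.slice?, if_neg (by norm_num : ¬(2:Int) = 0), sliceIdx]
  have hM : min ((2*dn : Nat) : Int) (xs.length : Int) = ((min (2*dn) xs.length : Nat) : Int) := by
    omega
  have hcount : (if (0:Int) < min ((2*dn : Nat) : Int) xs.length
      then (((min ((2*dn : Nat) : Int) xs.length) - 0 + 2 - 1)/2).toNat else 0)
      = (min (2*dn) xs.length + 1) / 2 := by
    rw [hM]; split <;> omega
  have hf : (fun k : Nat => xs[((0:Int) + 2 * (k:Int)).toNat]?) = (fun k : Nat => xs[2*k]?) := by
    funext k; congr 1; omega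
  norm_num only
  simp only [hf, hcount, if_true]
  rw [filterMap_evens xs ((min (2*dn) xs.length + 1) / 2) (by omega)]
  have htake : xs.take (2*((min (2*dn) xs.length + 1) / 2)) = xs.take (2*dn) := by
    by_cases hle : 2*dn ≤ xs.length
    · congr 1; omega
    · rw [List.take_of_length_le (by omega), List.take_of_length_le (by omega)]
  rw [htake]

theorem lcPass_lt (xs : List Int) (dn : Nat) (h2 : 2 ≤ xs.length) (h1 : 1 ≤ dn) :
    (lcPass xs dn).length < xs.length := by
  rw [lcPass_length]; omega

-- the B-side pass equals lcPass
theorem passB_eq_lcPass (xs : List Int) (d : Int) (hd : 0 ≤ d) :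
    ((PySem.List.slice? xs (some 0) (some (2*d)) 2).getD []) ++ PySem.List.slice xs (some (2*d)) none
      = lcPass xs d.toNat := by
  have h2d : (2*d : Int) = ((2*d.toNat : Nat) : Int) := by omega
  rw [h2d, slice?_step2, PySem.List.slice_from_natCast]
  rfl

-- main loop equivalence
theorem lc_main : ∀ (i : List Int) (length : Int), Pre_left_compaction i length →
    left_compaction i length = left_compaction_alt i length
  | i, length, hp => by
    rw [left_compaction, left_compaction_alt]
    by_cases h : PySem.List.len i > length
    · simp only [dif_pos h]
      have hlen : 1 ≤ length := by
        rcases hp with h1 | h1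
        · exact absurd h (not_lt.mpr h1)
        · exact h1
      have hlen' : length < (i.length : Int) := by simpa [PySem.List.len_eq] using h
      have hd0 : 0 ≤ PySem.List.len i - length := by rw [PySem.List.len_eq]; omega
      have hA := foldA_eq_lcPass i (PySem.List.len i - length) hd0
      have hB := passB_eq_lcPass i (PySem.List.len i - length) hd0
      rw [hA, hB]
      have h2 : 2 ≤ i.length := by omega
      have h1 : 1 ≤ (PySem.List.len i - length).toNat := by rw [PySem.List.len_eq]; omega
      have hlt := lcPass_lt i (PySem.List.len i - length).toNat h2 h1
      rw [dif_pos hlt, dif_pos hlt]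
      exact lc_main _ length (Or.inr hlen)
    · simp only [dif_neg h]
termination_by i _ _ => i.length
decreasing_by exact hlt

-- ===== VERDICT (by name: the statement is the Claim_ definition above) =====
theorem left_compaction_spec : Claim_equal_left_compaction := by
  intro i length _ hpre
  exact lc_main i length hpre
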